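-- pv_equiv track=rewrite | github.com/kdongsu5509/Haedal_AlgorithmStudy | MSKIM/11to20/11.py | solution
-- ===== SOURCE A (Python) =====
-- def solution(s):
--     stack=[]
--     for a in s:
--         if stack and stack[-1]==a:
--             stack.pop()
--         else:
--             stack.append(a)
--     return int(not stack)
-- ===== SOURCE B (Python) =====
-- def solution(s):
--     # repeatedly delete every first adjacent equal pair until a fixed point
--     while True:
--         t = _reduce_once(s)
--         if t == s:
--             break
--         s = t
--     return int(not s)
--
--
-- def _reduce_once(s):
--     out = []
--     i = 0
--     n = len(s)
--     while i < n:
--         if i + 1 < n and s[i] == s[i + 1]: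
--             i += 2
--         else:
--             out.append(s[i])
--             i += 1
--     return ''.join(out)
-- ===== Notes on version B (the rewrite author's own statement) =====
-- stated objective: alternative
-- what changed: Replaced the single stack pass with repeated removal of adjacent equal pairs until a fixed point, relying on confluence of pair-removal.
import Mathlib
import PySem

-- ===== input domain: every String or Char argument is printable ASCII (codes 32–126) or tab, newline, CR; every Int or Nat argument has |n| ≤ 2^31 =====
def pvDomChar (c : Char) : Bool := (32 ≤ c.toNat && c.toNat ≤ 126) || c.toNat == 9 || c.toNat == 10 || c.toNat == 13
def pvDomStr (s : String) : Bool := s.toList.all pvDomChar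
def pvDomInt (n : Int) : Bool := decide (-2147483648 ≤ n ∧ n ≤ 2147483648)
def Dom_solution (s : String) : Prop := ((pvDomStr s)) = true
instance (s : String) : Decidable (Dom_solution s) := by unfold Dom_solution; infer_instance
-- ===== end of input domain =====

-- B replaces A's single stack pass by repeated adjacent-pair removal to a fixed point (alternative algorithm, not faster).

-- ===== PORT A =====
-- one step of A's loop body: pop when the top equals a, else push (stack kept top-first)
def pvStep (stack : List Char) (a : Char) : List Char :=
  match stack with
  | b :: rest => if b = a then rest else a :: stack
  | [] => [a]

def solution (s : String) : Int :=
  let stack := s.toList.foldl pvStep []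
  if stack.isEmpty then 1 else 0

-- ===== PORT B =====
-- _reduce_once: one left-to-right scan dropping each first adjacent equal pair
def redOnce : List Char → List Char
  | [] => []
  | [a] => [a]
  | a :: b :: t => if a = b then redOnce t else a :: redOnce (b :: t)

theorem redOnce_length_le (l : List Char) : (redOnce l).length ≤ l.length := by
  induction l using redOnce.induct with
  | case1 => simp [redOnce]
  | case2 a => simp [redOnce]
  | case3 b t ih => simp [redOnce]; omega
  | case4 a b t hab ih => simp [redOnce, hab]; simpa using ih

theorem redOnce_length_lt (l : List Char) (h : redOnce l ≠ l) :
    (redOnce l).length < l.length := by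
  induction l using redOnce.induct with
  | case1 => simp [redOnce] at h
  | case2 a => simp [redOnce] at h
  | case3 b t ih =>
      have := redOnce_length_le t
      simp [redOnce]; omega
  | case4 a b t hab ih =>
      simp [redOnce, hab] at h ⊢
      have := ih h
      simp only [List.length_cons] at this
      omega

-- B's while-loop: iterate _reduce_once until unchanged
def reduceFull (l : List Char) : List Char :=
  if h : redOnce l = l then l else reduceFull (redOnce l)
termination_by l.length
decreasing_by exact redOnce_length_lt l h

def solution_alt (s : String) : Int :=
  if (reduceFull s.toList).isEmpty then 1 else 0

-- ===== PRECONDITION & SPEC =====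
def Spec_solution (s : String) (out : Int) : Prop := out = solution_alt s
instance (s : String) (out : Int) : Decidable (Spec_solution s out) := by unfold Spec_solution; infer_instance

-- ===== CLAIM (what is proved, stated in full; the proofs are below) =====
def Claim_equal_solution : Prop := ∀ (s : String), Dom_solution s → Spec_solution s (solution s)

-- ===== LEMMAS AND PROOFS =====

-- A's stack never holds two equal adjacent elements
theorem step_chain {st : List Char} (h : List.IsChain (· ≠ ·) st) (a : Char) :
    List.IsChain (· ≠ ·) (pvStep st a) := by
  cases st with
  | nil => simp [pvStep]
  | cons b rest =>
      by_cases hba : b = a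
      · simpa [pvStep, hba] using h.tail
      · simp only [pvStep, if_neg hba]
        exact h.cons (by intro y hy; simp at hy; subst hy; exact fun e => hba e.symm)

-- a pair of equal chars is absorbed by the fold when the stack is pair-free
theorem fold_pair {st : List Char} (h : List.IsChain (· ≠ ·) st) (x : Char) (v : List Char) :
    List.foldl pvStep st (x :: x :: v) = List.foldl pvStep st v := by
  cases st with
  | nil => simp [pvStep]
  | cons c r =>
      by_cases hcx : c = x
      · subst hcx
        cases r with
        | nil => simp [pvStep]
        | cons d r' =>
            have hcd : c ≠ d := (List.isChain_cons_cons.mp h).1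
            have hdc : ¬ d = c := fun e => hcd e.symm
            simp [pvStep, hdc]
      · simp [pvStep, hcx]

-- the stack fold is invariant under one reduction pass
theorem fold_redOnce (l : List Char) : ∀ (st : List Char), List.IsChain (· ≠ ·) st →
    List.foldl pvStep st l = List.foldl pvStep st (redOnce l) := by
  induction l using redOnce.induct with
  | case1 => intro st _; simp [redOnce]
  | case2 a => intro st _; simp [redOnce]
  | case3 b t ih =>
      intro st hst
      rw [redOnce, if_pos rfl]
      rw [fold_pair hst]
      exact ih st hst
  | case4 a b t hab ih =>
      intro st hst
      rw [redOnce, if_neg hab]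
      show List.foldl pvStep (pvStep st a) (b :: t) = List.foldl pvStep (pvStep st a) (redOnce (b :: t))
      exact ih _ (step_chain hst a)

-- hence invariant under the full reduction
theorem fold_reduceFull (l : List Char) :
    List.foldl pvStep [] l = List.foldl pvStep [] (reduceFull l) := by
  induction l using reduceFull.induct with
  | case1 l h => rw [reduceFull, dif_pos h]
  | case2 l h ih =>
      rw [reduceFull, dif_neg h]
      rw [fold_redOnce l [] (by simp)]
      exact ih

theorem reduceFull_fix (l : List Char) : redOnce (reduceFull l) = reduceFull l := by
  induction l using reduceFull.induct with
  | case1 l h => rw [reduceFull, dif_pos h]; exact h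
  | case2 l h ih => rw [reduceFull, dif_neg h]; exact ih

-- a fixed point of redOnce has no adjacent equal pair
theorem chain_of_fix (l : List Char) (h : redOnce l = l) : List.IsChain (· ≠ ·) l := by
  induction l using redOnce.induct with
  | case1 => simp
  | case2 a => simp
  | case3 b t ih =>
      rw [redOnce, if_pos rfl] at h
      have h1 := redOnce_length_le t
      have h2 : (redOnce t).length = t.length + 2 := by rw [h]; simp
      omega
  | case4 a b t hab ih =>
      rw [redOnce, if_neg hab] at h
      have h' : redOnce (b :: t) = b :: t := (List.cons.inj h).2
      exact List.isChain_cons_cons.mpr ⟨hab, ih h'⟩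

-- on a pair-free list the stack fold just reverses it onto the stack
theorem fold_chain (m : List Char) : ∀ (st : List Char),
    List.IsChain (· ≠ ·) (st.reverse ++ m) →
    List.foldl pvStep st m = m.reverse ++ st := by
  induction m with
  | nil => intro st _; simp
  | cons a m' ih =>
      intro st h
      have hstep : pvStep st a = a :: st := by
        cases st with
        | nil => rfl
        | cons c r =>
            have hca : c ≠ a := by
              have h2 := List.isChain_append.mp h
              exact h2.2.2 c (by simp [List.getLast?_append]) a (by simp)
            simp [pvStep, hca]
      rw [List.foldl_cons, hstep]
      have h' : List.IsChain (· ≠ ·) ((a :: st).reverse ++ m') := by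
        simpa using h
      rw [ih (a :: st) h']
      simp

-- ===== VERDICT (by name: the statement is the Claim_ definition above) =====
theorem solution_spec : Claim_equal_solution := by
  intro s _
  unfold Spec_solution solution solution_alt
  set l := s.toList
  have h1 := fold_reduceFull l
  have h2 := chain_of_fix (reduceFull l) (reduceFull_fix l)
  have h3 := fold_chain (reduceFull l) [] (by simpa using h2)
  simp only [h1, h3]
  simp [List.isEmpty_iff]
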